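-- pv_equiv track=rewrite | github.com/silverjjj/algorithm | Programmers/호텔방배정.py | solution
-- ===== SOURCE A (Python) =====
-- def solution(k, room_number):
--     answer = []
--     room = {}
--     for num in room_number:
--         # 방이 없을경우
--         tmp = room.get(num)
--         if not tmp:
--             room[num] = num + 1
--             answer.append(num)
--         # 방이 있을경우
--         else:
--             # cur = room.get(tmp) # 방이 있으니까 다음방 이동
--             arr = [tmp]
--             while True:
--                 next = tmp
--                 tmp = room.get(tmp) # 이동한 다음방의 방 유무
--                 # 방이 없는경우 => 방만들고 넣은뒤 break
--                 if not tmp: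
--                     room[next] = next + 1
--                     answer.append(next)
--                     for i in arr:   # 여태까지 거쳐온곳들도 다시 갱신해준다
--                         room[i] = next + 1
--                     break
--                 arr.append(tmp)
--     return answer
-- ===== SOURCE B (Python) =====
-- def solution(k, room_number):
--     # Direct greedy: keep the set of occupied rooms; for each request walk
--     # upward from the requested number to the first free room.
--     assigned = set()
--     answer = []
--     for num in room_number:
--         r = num
--         while r in assigned:
--             r += 1
--         assigned.add(r)
--         answer.append(r)
--     return answer
-- ===== Notes on version B (the rewrite author's own statement) =====
-- stated objective: simpler
-- what changed: Replaces A's pointer dict (next-free links followed and path-compressed per request) with direct linear probing over a plain set of occupied rooms; Pre_ excludes request lists that fully occupy the rooms -L..-1 and then revisit them (more than L requests in [-L,-1] for some L) - non-positive room numbers are outside the problem's natural domain, and there Python's falsy 0 (stored as room -1's successor) makes A treat already-occupied rooms as free and re-assign them, a value B should not mimic.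
-- outside the precondition, e.g. on solution(10, [-1, -1]): A returns [-1, -1], B returns [-1, 0]; on solution(10, [-2, -2, -2]): A returns [-2, -1, -1], B returns [-2, -1, 0]
import Mathlib
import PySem

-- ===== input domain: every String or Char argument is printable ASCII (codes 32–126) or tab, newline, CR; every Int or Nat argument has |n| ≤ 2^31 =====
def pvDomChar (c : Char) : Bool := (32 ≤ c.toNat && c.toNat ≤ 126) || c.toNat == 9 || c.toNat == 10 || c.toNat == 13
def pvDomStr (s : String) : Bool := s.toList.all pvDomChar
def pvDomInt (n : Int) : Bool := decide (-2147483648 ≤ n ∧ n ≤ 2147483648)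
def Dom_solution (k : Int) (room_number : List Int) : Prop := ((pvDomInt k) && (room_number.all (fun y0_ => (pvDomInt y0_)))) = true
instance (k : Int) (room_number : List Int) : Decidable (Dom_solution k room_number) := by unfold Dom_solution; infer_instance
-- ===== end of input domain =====

-- B replaces A's pointer dict (next-free links, path-compressed per request) with direct
-- linear probing over a set of occupied rooms; objective: simpler.

-- ===== PORT A =====
-- `tmp = room.get(x)` read through Python truthiness (`if not tmp`): none ⟺ key absent OR stored value 0
def pyGetTruthy (room : PySem.Dict Int Int) (x : Int) : Option Int :=
  match room.get? x with
  | some v => if v = 0 then none else some v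
  | none => none

-- the `while True` walk of A: next/tmp juggling, arr collected forward, writes done at the break
def solWalkA (fuel : Nat) (room : PySem.Dict Int Int) (answer : List Int)
    (tmp : Int) (arr : List Int) : PySem.Dict Int Int × List Int :=
  match fuel with
  | 0 => (room, answer)  -- fuel totalization; never reached (chains strictly increase)
  | fuel + 1 =>
    let next := tmp
    match pyGetTruthy room tmp with
    | none =>
      let room := room.insert next (next + 1)
      let answer := answer ++ [next]
      let room := arr.foldl (fun r i => r.insert i (next + 1)) room
      (room, answer)
    | some t => solWalkA fuel room answer t (arr ++ [t])

def solStepA (fuel : Nat) (st : PySem.Dict Int Int × List Int) (num : Int) :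
    PySem.Dict Int Int × List Int :=
  let (room, answer) := st
  match pyGetTruthy room num with
  | none => (room.insert num (num + 1), answer ++ [num])
  | some tmp => solWalkA fuel room answer tmp [tmp]

def solution (k : Int) (room_number : List Int) : List Int :=
  (room_number.foldl (solStepA (room_number.length + 1)) (PySem.Dict.empty, [])).2

-- ===== PORT B =====
-- `r = num; while r in assigned: r += 1`
def probeB (fuel : Nat) (assigned : PySem.Set Int) (r : Int) : Int :=
  match fuel with
  | 0 => r  -- fuel totalization; never reached (fuel exceeds the number of members ≥ r)
  | fuel + 1 => if assigned.contains r then probeB fuel assigned (r + 1) else r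

def solStepB (st : PySem.Set Int × List Int) (num : Int) : PySem.Set Int × List Int :=
  let r := probeB (st.1.length + 1) st.1 num
  (st.1.add r, st.2 ++ [r])

def solution_alt (k : Int) (room_number : List Int) : List Int :=
  (room_number.foldl solStepB (PySem.Set.empty, [])).2

-- ===== PRECONDITION & SPEC =====
-- Pre_ excludes request lists that fully occupy the rooms -L..-1 and then revisit them (more
-- than L requests in [-L,-1] for some L): non-positive room numbers are outside the problem's
-- natural domain, and there Python's falsy 0 (stored as room -1's successor) makes A treat
-- already-occupied rooms as free and re-assign them, a value B should not mimic.
def Pre_solution (k : Int) (room_number : List Int) : Prop :=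
  ∀ t < room_number.length,
    (room_number.filter (fun x => decide (-(t : Int) - 1 ≤ x) && decide (x ≤ -1))).length ≤ t + 1
instance (k : Int) (room_number : List Int) : Decidable (Pre_solution k room_number) := by
  unfold Pre_solution; infer_instance

def pvWitness_solution : Int × List Int := (10, [1, 2, 1])

def Spec_solution (k : Int) (room_number : List Int) (out : List Int) : Prop := out = solution_alt k room_number
instance (k : Int) (room_number : List Int) (out : List Int) : Decidable (Spec_solution k room_number out) := by unfold Spec_solution; infer_instance

-- ===== CLAIM (what is proved, stated in full; the proofs are below) =====
def Claim_equal_solution : Prop := ∀ (k : Int) (room_number : List Int), Dom_solution k room_number → Pre_solution k room_number → Spec_solution k room_number (solution k room_number)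

-- ===== LEMMAS AND PROOFS =====

-- generic filter-length facts
theorem length_filter_mono {α : Type} (L : List α) (p q : α → Bool) (h : ∀ x, p x = true → q x = true) :
    (L.filter p).length ≤ (L.filter q).length := by
  induction L with
  | nil => simp
  | cons x L ih =>
    simp only [List.filter_cons]
    cases hp : p x with
    | true => rw [h x hp]; simpa using ih
    | false =>
      cases hq : q x with
      | true => simp; omega
      | false => simpa using ih

theorem length_filter_lt {α : Type} (L : List α) (p q : α → Bool) (h : ∀ x, p x = true → q x = true)
    (a : α) (ha : a ∈ L) (hqa : q a = true) (hpa : p a = false) :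
    (L.filter p).length < (L.filter q).length := by
  induction L with
  | nil => simp at ha
  | cons x L ih =>
    simp only [List.filter_cons]
    rcases List.mem_cons.1 ha with hax | hax
    · subst hax
      rw [hpa, hqa]
      have := length_filter_mono L p q h
      simp; omega
    · have := ih hax
      cases hp : p x with
      | true => rw [h x hp]; simpa using this
      | false =>
        cases hq : q x with
        | true => simp; omega
        | false => simpa using this

theorem filter_split {α : Type} (L : List α) (p q r : α → Bool)
    (hq : ∀ x, q x = true → p x = true) (hr : ∀ x, r x = true → p x = true)
    (hqr : ∀ x, ¬(q x = true ∧ r x = true)) :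
    (L.filter q).length + (L.filter r).length ≤ (L.filter p).length := by
  induction L with
  | nil => simp
  | cons x L ih =>
    simp only [List.filter_cons]
    cases hqx : q x with
    | true =>
      rw [hq x hqx]
      have : r x = false := by
        cases hrx : r x with
        | true => exact absurd ⟨hqx, hrx⟩ (hqr x)
        | false => rfl
      rw [this]; simp; omega
    | false =>
      cases hrx : r x with
      | true => rw [hr x hrx]; simp; omega
      | false =>
        cases hpx : p x with
        | true => simp; omega
        | false => simpa using ih

-- get? through a bulk-insert fold of one value
theorem get?_foldl_ins (L : List Int) (D : PySem.Dict Int Int) (w y : Int) :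
    (L.foldl (fun d i => d.insert i w) D).get? y =
      if y ∈ L then some w else D.get? y := by
  induction L generalizing D with
  | nil => simp
  | cons x L ih =>
    simp only [List.foldl_cons, ih, List.mem_cons]
    rw [PySem.Dict.get?_insert]
    by_cases hyL : y ∈ L <;> by_cases hyx : y = x <;> simp [hyL, hyx]

-- A-side dict invariant: keys are exactly the occupied rooms; every stored value w at key x
-- satisfies x < w and rooms x..w-1 are occupied (so w-1 is occupied and w = 0 forces x..-1 occupied)
def GoodDict (room : PySem.Dict Int Int) (S : List Int) : Prop :=
  (∀ x : Int, room.get? x = none ↔ x ∉ S) ∧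
  (∀ x w : Int, room.get? x = some w → x < w ∧ ∀ y : Int, x ≤ y → y < w → y ∈ S)

-- the quirk-free region for one request: non-positive chains only start where a free room ≤ -1 exists
def SafeReq (S : List Int) (num : Int) : Prop :=
  0 ≤ num ∨ ∃ b : Int, num ≤ b ∧ b ≤ -1 ∧ b ∉ S

-- occupied runs ending ≤ -1 were paid for by as many requests of the processed prefix
def RunCount (P S : List Int) : Prop :=
  ∀ u v : Int, u ≤ v → v ≤ -1 → (∀ y : Int, u ≤ y → y ≤ v → y ∈ S) → (u - 1) ∉ S →
    v - u + 1 ≤ ((P.filter (fun x => decide (u ≤ x) && decide (x ≤ v))).length : Int)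

theorem probe_spec (S : PySem.Set Int) : ∀ (fuel : Nat) (r : Int),
    (S.filter (fun y => decide (r ≤ y))).length < fuel →
    probeB fuel S r ∉ S ∧ r ≤ probeB fuel S r ∧
      ∀ y : Int, r ≤ y → y < probeB fuel S r → y ∈ S := by
  intro fuel
  induction fuel with
  | zero => intro r h; omega
  | succ n ih =>
    intro r h
    by_cases hr : r ∈ S
    · have hc : S.contains r = true := (PySem.Set.contains_iff S r).2 hr
      have hdec : (S.filter (fun y => decide (r + 1 ≤ y))).length <
          (S.filter (fun y => decide (r ≤ y))).length := by
        apply length_filter_lt S _ _ ?_ r hr (by simp) (by simp)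
        intro x hx; simp at hx ⊢; omega
      have := ih (r + 1) (by omega)
      simp only [probeB, hc, if_true]
      refine ⟨this.1, by omega, ?_⟩
      intro y h1 h2
      rcases eq_or_lt_of_le h1 with h3 | h3
      · exact h3 ▸ hr
      · exact this.2.2 y (by omega) h2
    · have hc : S.contains r = false := by
        cases hcc : S.contains r with
        | true => exact absurd ((PySem.Set.contains_iff S r).1 hcc) hr
        | false => rfl
      simp only [probeB, hc]
      exact ⟨hr, le_rfl, fun y h1 h2 => absurd h2 (not_lt.2 h1)⟩

theorem least_unique (S : List Int) (lo ρ₁ ρ₂ : Int)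
    (h₁ : ρ₁ ∉ S ∧ lo ≤ ρ₁ ∧ ∀ y : Int, lo ≤ y → y < ρ₁ → y ∈ S)
    (h₂ : ρ₂ ∉ S ∧ lo ≤ ρ₂ ∧ ∀ y : Int, lo ≤ y → y < ρ₂ → y ∈ S) : ρ₁ = ρ₂ := by
  rcases lt_trichotomy ρ₁ ρ₂ with h | h | h
  · exact absurd (h₂.2.2 ρ₁ h₁.2.1 h) h₁.1
  · exact h
  · exact absurd (h₁.2.2 ρ₂ h₂.2.1 h) h₂.1

theorem goodDict_after (room : PySem.Dict Int Int) (S : List Int) (lo ρ : Int) (arrF : List Int)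
    (hg : GoodDict room S) (hρ : ρ ∉ S) (hloρ : lo ≤ ρ)
    (hint : ∀ y : Int, lo ≤ y → y < ρ → y ∈ S)
    (harr : ∀ i ∈ arrF, lo ≤ i ∧ i ≤ ρ) :
    GoodDict (arrF.foldl (fun r i => r.insert i (ρ + 1)) (room.insert ρ (ρ + 1))) (S ++ [ρ]) := by
  have hget : ∀ x : Int,
      (arrF.foldl (fun r i => r.insert i (ρ + 1)) (room.insert ρ (ρ + 1))).get? x =
        if x ∈ arrF then some (ρ + 1) else if x = ρ then some (ρ + 1) else room.get? x := by
    intro x; rw [get?_foldl_ins, PySem.Dict.get?_insert]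
  constructor
  · intro x
    rw [hget x]
    by_cases hxa : x ∈ arrF
    · have hxin : x ∈ S ++ [ρ] := by
        obtain ⟨h1, h2⟩ := harr x hxa
        rcases eq_or_lt_of_le h2 with h3 | h3
        · exact List.mem_append_right _ (by simp [h3])
        · exact List.mem_append_left _ (hint x h1 h3)
      simp [hxa, hxin]
    · by_cases hxρ : x = ρ
      · simp [hxa, hxρ]
      · simp only [hxa, if_false, hxρ]
        rw [hg.1 x]
        simp [List.mem_append, hxρ]
  · intro x w
    rw [hget x]
    by_cases hxa : x ∈ arrF
    · simp only [hxa, if_true]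
      intro hw
      obtain ⟨h1, h2⟩ := harr x hxa
      have hw' : w = ρ + 1 := (Option.some.inj hw).symm
      subst hw'
      refine ⟨by omega, ?_⟩
      intro y hy1 hy2
      rcases eq_or_lt_of_le (show y ≤ ρ by omega) with h3 | h3
      · exact List.mem_append_right _ (by simp [h3])
      · exact List.mem_append_left _ (hint y (by omega) h3)
    · by_cases hxρ : x = ρ
      · subst hxρ
        rw [if_neg hxa, if_pos rfl]
        intro hw
        have hw' : w = x + 1 := (Option.some.inj hw).symm
        subst hw'
        refine ⟨by omega, ?_⟩
        intro y hy1 hy2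
        have h3 : y = x := by omega
        exact List.mem_append_right _ (by simp [h3])
      · simp only [hxa, if_false, hxρ]
        intro hw
        obtain ⟨h1, h2⟩ := hg.2 x w hw
        exact ⟨h1, fun y hy1 hy2 => List.mem_append_left _ (h2 y hy1 hy2)⟩

theorem walkA_spec : ∀ (fuel : Nat) (room : PySem.Dict Int Int) (S : List Int)
    (ans : List Int) (t lo : Int) (arr : List Int),
    GoodDict room S →
    (S.filter (fun y => decide (t ≤ y))).length < fuel →
    SafeReq S lo → lo ≤ t →
    (∀ y : Int, lo ≤ y → y < t → y ∈ S) →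
    (∀ i ∈ arr, lo ≤ i ∧ i ≤ t) →
    ∃ (ρ : Int) (arrF : List Int),
      ρ ∉ S ∧ t ≤ ρ ∧ (∀ y : Int, lo ≤ y → y < ρ → y ∈ S) ∧ (∀ i ∈ arrF, lo ≤ i ∧ i ≤ ρ) ∧
      solWalkA fuel room ans t arr =
        (arrF.foldl (fun r i => r.insert i (ρ + 1)) (room.insert ρ (ρ + 1)), ans ++ [ρ]) := by
  intro fuel
  induction fuel with
  | zero => intro _ _ _ _ _ _ _ h; omega
  | succ n ih =>
    intro room S ans t lo arr hg hfuel hsafe hlot hint harr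
    cases hgt : pyGetTruthy room t with
    | none =>
      cases hq : room.get? t with
      | none =>
        refine ⟨t, arr, (hg.1 t).1 hq, le_rfl, hint, harr, ?_⟩
        simp only [solWalkA, hgt]
      | some w =>
        have hw0 : w = 0 := by
          unfold pyGetTruthy at hgt
          rw [hq] at hgt
          by_cases h0 : w = 0
          · exact h0
          · simp [h0] at hgt
        subst hw0
        exfalso
        obtain ⟨hlt, hintv⟩ := hg.2 t 0 hq
        rcases hsafe with h0 | ⟨b, hb1, hb2, hb3⟩
        · omega
        · by_cases hbt : b < t
          · exact hb3 (hint b hb1 hbt)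
          · exact hb3 (hintv b (by omega) (by omega))
    | some w =>
      have hq : room.get? t = some w := by
        unfold pyGetTruthy at hgt
        cases hq2 : room.get? t with
        | none => rw [hq2] at hgt; cases hgt
        | some v =>
          rw [hq2] at hgt
          by_cases h0 : v = 0
          · simp [h0] at hgt
          · simp only [h0, if_false] at hgt
            rw [Option.some.inj hgt]
      obtain ⟨hlt, hintv⟩ := hg.2 t w hq
      have htS : t ∈ S := by
        by_contra hc
        have hnone := (hg.1 t).2 hc
        rw [hnone] at hq
        cases hq
      have hint2 : ∀ y : Int, lo ≤ y → y < w → y ∈ S := by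
        intro y h1 h2
        by_cases h3 : y < t
        · exact hint y h1 h3
        · exact hintv y (by omega) h2
      have hfuel2 : (S.filter (fun y => decide (w ≤ y))).length < n := by
        have hl := length_filter_lt S (fun y => decide (w ≤ y)) (fun y => decide (t ≤ y))
          (by intro x hx; simp at hx ⊢; omega) t htS (by simp) (by simp; omega)
        omega
      have harr2 : ∀ i ∈ arr ++ [w], lo ≤ i ∧ i ≤ w := by
        intro i hi
        rcases List.mem_append.1 hi with h | h
        · obtain ⟨h1, h2⟩ := harr i h
          exact ⟨h1, by omega⟩
        · simp at h; subst h; exact ⟨by omega, le_rfl⟩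
      obtain ⟨ρ, arrF, h1, h2, h3, h4, h5⟩ := ih room S ans w lo (arr ++ [w]) hg hfuel2 hsafe (by omega) hint2 harr2
      refine ⟨ρ, arrF, h1, by omega, h3, h4, ?_⟩
      simp only [solWalkA, hgt]
      exact h5

theorem stepA_spec (fuel : Nat) (room : PySem.Dict Int Int) (S ans : List Int) (num : Int)
    (hg : GoodDict room S) (hfuel : S.length < fuel) (hsafe : SafeReq S num) :
    ∃ (ρ : Int) (room' : PySem.Dict Int Int),
      solStepA fuel (room, ans) num = (room', ans ++ [ρ]) ∧
      ρ ∉ S ∧ num ≤ ρ ∧ (∀ y : Int, num ≤ y → y < ρ → y ∈ S) ∧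
      GoodDict room' (S ++ [ρ]) := by
  cases hgt : pyGetTruthy room num with
  | none =>
    cases hq : room.get? num with
    | none =>
      have hnS : num ∉ S := (hg.1 num).1 hq
      refine ⟨num, room.insert num (num + 1), ?_, hnS, le_rfl, fun y h1 h2 => absurd h2 (by omega), ?_⟩
      · simp only [solStepA, hgt]
      · have := goodDict_after room S num num [] hg hnS le_rfl
          (fun y h1 h2 => absurd h2 (by omega)) (by intro i hi; cases hi)
        simpa using this
    | some w =>
      have hw0 : w = 0 := by
        unfold pyGetTruthy at hgt
        rw [hq] at hgt
        by_cases h0 : w = 0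
        · exact h0
        · simp [h0] at hgt
      subst hw0
      exfalso
      obtain ⟨hlt, hintv⟩ := hg.2 num 0 hq
      rcases hsafe with h0 | ⟨b, hb1, hb2, hb3⟩
      · omega
      · exact hb3 (hintv b hb1 (by omega))
  | some w =>
    have hq : room.get? num = some w := by
      unfold pyGetTruthy at hgt
      cases hq2 : room.get? num with
      | none => rw [hq2] at hgt; cases hgt
      | some v =>
        rw [hq2] at hgt
        by_cases h0 : v = 0
        · simp [h0] at hgt
        · simp only [h0, if_false] at hgt
          rw [Option.some.inj hgt]
    obtain ⟨hlt, hintv⟩ := hg.2 num w hq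
    have hfuel2 : (S.filter (fun y => decide (w ≤ y))).length < fuel := by
      have := List.length_filter_le (fun y => decide (w ≤ y)) S
      omega
    obtain ⟨ρ, arrF, h1, h2, h3, h4, h5⟩ := walkA_spec fuel room S ans w num [w] hg hfuel2 hsafe
      (by omega) (fun y hy1 hy2 => hintv y hy1 hy2)
      (by intro i hi; simp at hi; subst hi; exact ⟨by omega, le_rfl⟩)
    refine ⟨ρ, arrF.foldl (fun r i => r.insert i (ρ + 1)) (room.insert ρ (ρ + 1)), ?_, h1, by omega, h3, ?_⟩
    · simp only [solStepA, hgt]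
      exact h5
    · exact goodDict_after room S num ρ arrF hg h1 (by omega) h3 h4

theorem runcount_step (P S : List Int) (num ρ : Int)
    (hrc : RunCount P S) (hρ : ρ ∉ S) (hnum : num ≤ ρ)
    (hint : ∀ y : Int, num ≤ y → y < ρ → y ∈ S) :
    RunCount (P ++ [num]) (S ++ [ρ]) := by
  intro u v huv hv hin hfree
  have hfreeS : (u - 1) ∉ S := fun hm => hfree (List.mem_append_left _ hm)
  have hcnt : ∀ (p : Int → Bool), p num = true → ((P ++ [num]).filter p).length =
      (P.filter p).length + 1 := by
    intro p hp
    rw [List.filter_append, List.filter_cons, hp]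
    simp
  have hmono : ∀ (p : Int → Bool), (P.filter p).length ≤ ((P ++ [num]).filter p).length := by
    intro p
    rw [List.filter_append, List.length_append]
    omega
  by_cases hmid : u ≤ ρ ∧ ρ ≤ v
  · obtain ⟨huρ, hρv⟩ := hmid
    have hnumu : u ≤ num := by
      by_contra hcon
      push_neg at hcon
      exact hfree (List.mem_append_left _ (hint (u - 1) (by omega) (by omega)))
    have hmemS : ∀ y : Int, u ≤ y → y ≤ v → y ≠ ρ → y ∈ S := by
      intro y h1 h2 h3
      rcases List.mem_append.1 (hin y h1 h2) with h | h
      · exact h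
      · simp at h; omega
    have c1 : (ρ - 1) - u + 1 ≤ ((P.filter (fun x => decide (u ≤ x) && decide (x ≤ ρ - 1))).length : Int) ∨ ρ = u := by
      by_cases hc : u ≤ ρ - 1
      · exact Or.inl (hrc u (ρ - 1) hc (by omega)
          (fun y h1 h2 => hmemS y h1 (by omega) (by omega)) hfreeS)
      · exact Or.inr (by omega)
    have c2 : v - (ρ + 1) + 1 ≤ ((P.filter (fun x => decide (ρ + 1 ≤ x) && decide (x ≤ v))).length : Int) ∨ ρ = v := by
      by_cases hc : ρ + 1 ≤ v
      · exact Or.inl (hrc (ρ + 1) v hc hv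
          (fun y h1 h2 => hmemS y (by omega) h2 (by omega)) (by simpa using hρ))
      · exact Or.inr (by omega)
    have hsplit := filter_split P (fun x => decide (u ≤ x) && decide (x ≤ v))
      (fun x => decide (u ≤ x) && decide (x ≤ ρ - 1)) (fun x => decide (ρ + 1 ≤ x) && decide (x ≤ v))
      (by intro x hx; simp at hx ⊢; omega) (by intro x hx; simp at hx ⊢; omega)
      (by intro x hx; simp at hx; omega)
    rw [hcnt _ (by simp; omega)]
    -- empty-interval cases: when ρ = u the first count is over an empty interval, etc.
    have e1 : ρ = u → ((P.filter (fun x => decide (u ≤ x) && decide (x ≤ ρ - 1))).length = 0) := by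
      intro h
      have hnil : P.filter (fun x => decide (u ≤ x) && decide (x ≤ ρ - 1)) = [] := by
        apply List.filter_eq_nil_iff.2
        intro x _
        simp only [Bool.and_eq_true, decide_eq_true_eq]
        omega
      rw [hnil]
      rfl
    have e2 : ρ = v → ((P.filter (fun x => decide (ρ + 1 ≤ x) && decide (x ≤ v))).length = 0) := by
      intro h
      have hnil : P.filter (fun x => decide (ρ + 1 ≤ x) && decide (x ≤ v)) = [] := by
        apply List.filter_eq_nil_iff.2
        intro x _
        simp only [Bool.and_eq_true, decide_eq_true_eq]
        omega
      rw [hnil]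
      rfl
    rcases c1 with c1 | c1 <;> rcases c2 with c2 | c2 <;>
      [skip; (rw [e2 c2] at hsplit); (rw [e1 c1] at hsplit); (rw [e1 c1] at hsplit; rw [e2 c2] at hsplit)] <;>
      push_cast <;> omega
  · have hsub : ∀ y : Int, u ≤ y → y ≤ v → y ∈ S := by
      intro y h1 h2
      rcases List.mem_append.1 (hin y h1 h2) with h | h
      · exact h
      · simp at h; push_neg at hmid; subst h; omega
    have h1 := hrc u v huv hv hsub hfreeS
    have h2 := hmono (fun x => decide (u ≤ x) && decide (x ≤ v))
    omega

theorem exists_run_start (S : List Int) : ∀ (fuel : Nat) (u : Int),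
    (S.filter (fun y => decide (y ≤ u - 1))).length < fuel →
    (∀ y : Int, u ≤ y → y ≤ -1 → y ∈ S) →
    ∃ u' : Int, u' ≤ u ∧ (∀ y : Int, u' ≤ y → y ≤ -1 → y ∈ S) ∧ (u' - 1) ∉ S := by
  intro fuel
  induction fuel with
  | zero => intro u h; omega
  | succ n ih =>
    intro u hfuel hin
    by_cases h : (u - 1) ∈ S
    · have hdec : (S.filter (fun y => decide (y ≤ u - 1 - 1))).length <
          (S.filter (fun y => decide (y ≤ u - 1))).length := by
        apply length_filter_lt S _ _ ?_ (u - 1) h (by simp) (by simp)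
        intro x hx; simp at hx ⊢; omega
      obtain ⟨u', h1, h2, h3⟩ := ih (u - 1) (by omega) (by
        intro y hy1 hy2
        by_cases hyu : u ≤ y
        · exact hin y hyu hy2
        · have : y = u - 1 := by omega
          exact this ▸ h)
      exact ⟨u', by omega, h2, h3⟩
    · exact ⟨u, le_rfl, hin, h⟩

theorem pre_all (k : Int) (rn : List Int) (h : Pre_solution k rn) :
    ∀ L : Nat, (rn.filter (fun x => decide (-(L : Int) ≤ x) && decide (x ≤ -1))).length ≤ L := by
  intro L
  by_cases hL : L = 0
  · subst hL
    have hnil : rn.filter (fun x => decide (-((0 : Nat) : Int) ≤ x) && decide (x ≤ -1)) = [] := by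
      apply List.filter_eq_nil_iff.2
      intro x _
      simp only [Bool.and_eq_true, decide_eq_true_eq]
      omega
    rw [hnil]
    simp
  by_cases h2 : L ≤ rn.length
  · have := h (L - 1) (by omega)
    have hcast : -((L - 1 : Nat) : Int) - 1 = -(L : Int) := by omega
    simp only [hcast] at this
    omega
  · have := List.length_filter_le (fun x => decide (-(L : Int) ≤ x) && decide (x ≤ -1)) rn
    omega

theorem safe_of_pre (P Q S : List Int) (num k : Int)
    (hrc : RunCount P S)
    (hpre : ∀ L : Nat, ((P ++ num :: Q).filter (fun x => decide (-(L : Int) ≤ x) && decide (x ≤ -1))).length ≤ L) :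
    SafeReq S num := by
  by_cases h0 : 0 ≤ num
  · exact Or.inl h0
  right
  by_contra hall
  push_neg at hall
  obtain ⟨u', hu1, hu2, hu3⟩ := exists_run_start S (S.length + 1) num
    (Nat.lt_succ_of_le (List.length_filter_le _ _))
    (fun y h1 h2 => hall y h1 h2)
  have hcount := hrc u' (-1) (by omega) le_rfl hu2 hu3
  have hL : ((-u').toNat : Int) = -u' := Int.toNat_of_nonneg (by omega)
  have hglob := hpre (-u').toNat
  have hcast : -(((-u').toNat : Nat) : Int) = u' := by omega
  simp only [hcast] at hglob
  rw [List.filter_append, List.filter_cons] at hglob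
  have hnum : (decide (u' ≤ num) && decide (num ≤ -1)) = true := by simp; omega
  rw [hnum] at hglob
  simp only [if_true, List.length_append, List.length_cons] at hglob
  omega

theorem fold_eq (N : Nat) (k : Int) : ∀ (Q P : List Int) (room : PySem.Dict Int Int) (S ans : List Int),
    GoodDict room S → RunCount P S →
    (∀ L : Nat, ((P ++ Q).filter (fun x => decide (-(L : Int) ≤ x) && decide (x ≤ -1))).length ≤ L) →
    S.length + Q.length ≤ N →
    (Q.foldl (solStepA (N + 1)) (room, ans)).2 = (Q.foldl solStepB (S, ans)).2 := by
  intro Q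
  induction Q with
  | nil => intro P room S ans _ _ _ _; rfl
  | cons num Q ih =>
    intro P room S ans hg hrc hpre hlen
    have hsafe : SafeReq S num := safe_of_pre P Q S num k hrc hpre
    obtain ⟨ρ, room2, heqA, hρ, hnumρ, hintρ, hg2⟩ :=
      stepA_spec (N + 1) room S ans num hg (by simp at hlen; omega) hsafe
    have hprobe := probe_spec S (S.length + 1) num
      (Nat.lt_succ_of_le (List.length_filter_le _ _))
    have hρB : probeB (S.length + 1) S num = ρ :=
      least_unique S num _ ρ ⟨hprobe.1, hprobe.2.1, hprobe.2.2⟩ ⟨hρ, hnumρ, hintρ⟩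
    have heqB : solStepB (S, ans) num = (S ++ [ρ], ans ++ [ρ]) := by
      simp only [solStepB, hρB]
      rw [PySem.Set.add_of_not_mem hρ]
    simp only [List.foldl_cons, heqA, heqB]
    have hpre2 : ∀ L : Nat, (((P ++ [num]) ++ Q).filter (fun x => decide (-(L : Int) ≤ x) && decide (x ≤ -1))).length ≤ L := by
      intro L
      have : (P ++ [num]) ++ Q = P ++ num :: Q := by simp
      rw [this]
      exact hpre L
    exact ih (P ++ [num]) room2 (S ++ [ρ]) (ans ++ [ρ]) hg2
      (runcount_step P S num ρ hrc hρ hnumρ hintρ) hpre2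
      (by simp at hlen ⊢; omega)

-- ===== VERDICT (by name: the statement is the Claim_ definition above) =====
theorem solution_spec : Claim_equal_solution := by
  intro k rn _ hpre
  unfold Spec_solution solution solution_alt
  refine fold_eq rn.length k rn [] PySem.Dict.empty PySem.Set.empty [] ?_ ?_ ?_ ?_
  · constructor
    · intro x; simp [PySem.Dict.get?_empty, PySem.Set.empty]
    · intro x w h; simp [PySem.Dict.get?_empty] at h
  · intro u v huv _ hin _
    exact absurd (hin u le_rfl huv) (by simp [PySem.Set.empty])
  · simpa using pre_all k rn hpre
  · simp [PySem.Set.empty]
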